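-- pv_equiv track=rewrite | github.com/astamagg/multi_access | ParticipantComponents/AccessLeader.py | split_owners
-- ===== SOURCE A (Python) =====
-- def split_owners(n_owner, n_operators):
--     modulus = n_owner % n_operators
--     split = n_owner // n_operators
--     offsets = []
--
--     curr_offset = 0
--     if n_operators == 1:
--         offsets.append(split)
--     else:
--         for i in range(n_operators):
--             if i != (n_operators - 1):
--                 curr_offset = split + curr_offset
--
--             if modulus > 0:
--                 curr_offset += 1
--                 modulus = modulus - 1
--
--             offsets.append(curr_offset)
--
--     return offsets
-- ===== SOURCE B (Python) =====
-- def split_owners(n_owner, n_operators):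
--     split = n_owner // n_operators
--     M = n_owner % n_operators
--     if n_operators == 1:
--         return [split]
--     if n_operators < 1:
--         return []
--     return [split * (i + 1) + min(i + 1, M) for i in range(n_operators - 1)] \
--         + [split * (n_operators - 1) + M]
-- ===== Notes on version B (the rewrite author's own statement) =====
-- stated objective: simpler
-- what changed: Replaces the incremental running-accumulator loop (mutating modulus and curr_offset per iteration) with a closed-form per-index formula split*(i+1)+min(i+1,M) plus an explicit last element split*(n_operators-1)+M.
import Mathlib
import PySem

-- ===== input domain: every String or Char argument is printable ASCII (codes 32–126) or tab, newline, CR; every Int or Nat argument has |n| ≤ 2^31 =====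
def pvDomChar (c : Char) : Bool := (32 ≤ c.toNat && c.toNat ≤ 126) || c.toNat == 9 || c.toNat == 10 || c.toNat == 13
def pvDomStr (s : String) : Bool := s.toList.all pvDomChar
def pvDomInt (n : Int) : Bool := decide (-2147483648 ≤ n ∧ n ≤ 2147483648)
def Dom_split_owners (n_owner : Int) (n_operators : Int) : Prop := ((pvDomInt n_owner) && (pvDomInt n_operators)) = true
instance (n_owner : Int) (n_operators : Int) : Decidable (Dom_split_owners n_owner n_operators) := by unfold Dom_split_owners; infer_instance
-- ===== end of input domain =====

-- B replaces A's running-accumulator loop by a closed-form per-index formula (objective: simpler).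

-- ===== PORT A =====
-- loop state: (modulus, curr_offset, offsets)
def split_owners (n_owner : Int) (n_operators : Int) : List Int :=
  let modulus := PySem.Int.mod n_owner n_operators
  let split := PySem.Int.floordiv n_owner n_operators
  if n_operators == 1 then [split]
  else
    let st := (PySem.List.pyRange 0 n_operators 1).foldl
      (fun (s : Int × Int × List Int) i =>
        let c1 := if i ≠ n_operators - 1 then split + s.2.1 else s.2.1
        let mc : Int × Int := if s.1 > 0 then (s.1 - 1, c1 + 1) else (s.1, c1)
        (mc.1, mc.2, s.2.2 ++ [mc.2]))
      (modulus, 0, [])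
    st.2.2

-- ===== PORT B =====
def split_owners_alt (n_owner : Int) (n_operators : Int) : List Int :=
  let split := PySem.Int.floordiv n_owner n_operators
  let M := PySem.Int.mod n_owner n_operators
  if n_operators == 1 then [split]
  else if n_operators < 1 then []
  else ((PySem.List.pyRange 0 (n_operators - 1) 1).map
          (fun i => split * (i + 1) + min (i + 1) M))
       ++ [split * (n_operators - 1) + M]

-- ===== PRECONDITION & SPEC =====
-- A raises ZeroDivisionError iff n_operators = 0; exactly that input is excluded.
def Pre_split_owners (n_owner : Int) (n_operators : Int) : Prop := n_operators ≠ 0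
instance (n_owner : Int) (n_operators : Int) : Decidable (Pre_split_owners n_owner n_operators) := by unfold Pre_split_owners; infer_instance
def pvWitness_split_owners : Int × Int := (7, 3)

def Spec_split_owners (n_owner : Int) (n_operators : Int) (out : List Int) : Prop := out = split_owners_alt n_owner n_operators
instance (n_owner : Int) (n_operators : Int) (out : List Int) : Decidable (Spec_split_owners n_owner n_operators out) := by unfold Spec_split_owners; infer_instance

-- ===== CLAIM (what is proved, stated in full; the proofs are below) =====
def Claim_equal_split_owners : Prop := ∀ (n_owner : Int) (n_operators : Int), Dom_split_owners n_owner n_operators → Pre_split_owners n_owner n_operators → Spec_split_owners n_owner n_operators (split_owners n_owner n_operators)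

-- ===== LEMMAS AND PROOFS =====

-- A's loop characterized on the prefix range(k), 1 ≤ k ≤ n, with 0 ≤ M < n.
theorem loopA_spec (split M n : Int) (hn : 2 ≤ n) (hM0 : 0 ≤ M) (hMn : M < n)
    (k : Int) (hk1 : 1 ≤ k) (hkn : k ≤ n) :
    (PySem.List.pyRange 0 k 1).foldl
      (fun (s : Int × Int × List Int) i =>
        let c1 := if i ≠ n - 1 then split + s.2.1 else s.2.1
        let mc : Int × Int := if s.1 > 0 then (s.1 - 1, c1 + 1) else (s.1, c1)
        (mc.1, mc.2, s.2.2 ++ [mc.2]))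
      (M, 0, [])
    = (M - min k M, split * (min k (n - 1)) + min k M,
       (PySem.List.pyRange 0 k 1).map (fun j => split * (min (j + 1) (n - 1)) + min (j + 1) M)) := by
  induction k, hk1 using Int.le_induction with
  | base =>
    have hr : PySem.List.pyRange 0 1 1 = [0] := by
      simpa using PySem.List.pyRange_one_singleton (a := 0)
    rw [hr]
    simp only [List.foldl, List.map]
    have h1 : (0 : Int) ≠ n - 1 := by omega
    have a1 : min (0 + 1 : Int) (n - 1) = 1 := min_eq_left (by omega)
    by_cases hM : M > 0
    · have a2 : min (0 + 1 : Int) M = 1 := min_eq_left (by omega)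
      rw [if_pos h1, if_pos hM, a1, a2]
      refine Prod.ext (by omega) (Prod.ext ?_ (by norm_num))
      rw [min_eq_left (by omega : (1:Int) ≤ n - 1), min_eq_left (by omega : (1:Int) ≤ M)]
      ring
    · have hMz : M = 0 := by omega
      have a2 : min (0 + 1 : Int) M = 0 := by simp [hMz]
      rw [if_pos h1, if_neg hM, a1, a2]
      refine Prod.ext (by omega) (Prod.ext ?_ (by norm_num))
      rw [min_eq_left (by omega : (1:Int) ≤ n - 1), hMz]
      norm_num
  | succ k hk ih =>
    have ihh := ih (by omega)
    rw [PySem.List.pyRange_one_succ_right (by omega : (0:Int) ≤ k), List.foldl_append,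
        List.map_append, ihh]
    simp only [List.foldl, List.map]
    by_cases hlast : k ≠ n - 1
    · have h1 : min k (n - 1) = k := min_eq_left (by omega)
      have h2 : min (k + 1) (n - 1) = k + 1 := min_eq_left (by omega)
      by_cases hM : M - min k M > 0
      · have hkM : min k M = k := by
          rcases le_total k M with h | h
          · exact min_eq_left h
          · have := min_eq_right h; omega
        have hkltM : k < M := by omega
        have h3 : min (k + 1) M = k + 1 := min_eq_left (by omega)
        rw [hkM] at hM ⊢
        rw [if_pos hlast, if_pos hM, h1, h2, h3]
        refine Prod.ext (by omega) (Prod.ext (by ring) ?_)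
        simp only; congr 1; ring_nf
      · have hkM : min k M = M := by
          have hle : min k M ≤ M := min_le_right k M
          omega
        have hMk : M ≤ k := by
          have := min_le_left k M; omega
        have h3 : min (k + 1) M = M := min_eq_right (by omega)
        have hMM : ¬ ((M - M : Int) > 0) := by omega
        rw [hkM]
        rw [if_pos hlast, if_neg hMM, h1, h2, h3]
        refine Prod.ext (by omega) (Prod.ext (by ring) ?_)
        simp only; congr 1; ring_nf
    · -- last iteration: i = n - 1, split not added, modulus exhausted
      have hkeq : k = n - 1 := by omega
      have hMk : M ≤ k := by omega
      have hmkM : min k M = M := min_eq_right hMk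
      have h1 : min k (n - 1) = k := min_eq_left (by omega)
      have h2 : min (k + 1) (n - 1) = k := by rw [hkeq]; exact min_eq_right (by omega)
      have h3 : min (k + 1) M = M := min_eq_right (by omega)
      have hMM : ¬ ((M - M : Int) > 0) := by omega
      rw [hmkM]
      rw [if_neg hlast, if_neg hMM, h1, h2, h3]

-- ===== VERDICT (by name: the statement is the Claim_ definition above) =====
theorem split_owners_spec : Claim_equal_split_owners := by
  intro a n _ hpre
  unfold Spec_split_owners split_owners split_owners_alt Pre_split_owners at *
  by_cases h1 : n = 1
  · simp [h1]
  · simp only [beq_iff_eq, h1, if_false]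
    by_cases hlt : n < 1
    · rw [PySem.List.pyRange_one_eq_nil (by omega), if_pos hlt]
      simp
    · rw [if_neg hlt]
      have hn : 2 ≤ n := by omega
      set M := PySem.Int.mod a n with hMdef
      set split := PySem.Int.floordiv a n with hSdef
      have hmod : M = a % n := by rw [hMdef, PySem.Int.mod_eq_emod_of_pos (by omega)]
      have hM0 : 0 ≤ M := by rw [hmod]; exact Int.emod_nonneg a (by omega)
      have hMn : M < n := by rw [hmod]; exact Int.emod_lt_of_pos a (by omega)
      have := loopA_spec split M n hn hM0 hMn n (by omega) le_rfl
      simp only [this]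
      -- now: map over range n  =  map over range (n-1) ++ [last]
      have hr : PySem.List.pyRange 0 n 1
          = PySem.List.pyRange 0 (n - 1) 1 ++ [n - 1] := by
        have := PySem.List.pyRange_one_succ_right (a := 0) (b := n - 1) (by omega)
        rw [show n - 1 + 1 = n by ring] at this
        exact this
      rw [hr, List.map_append]
      congr 1
      · apply List.map_congr_left
        intro j hj
        rw [PySem.List.mem_pyRange_one] at hj
        have : min (j + 1) (n - 1) = j + 1 := by omega
        rw [this]
      · simp only [List.map]
        have h2 : min (n - 1 + 1) (n - 1) = n - 1 := by omega
        have h3 : min (n - 1 + 1) M = M := by omega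
        rw [h2, h3]
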